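-- pv_equiv track=rewrite | github.com/kscold/Algorithm | python/smu/smu 정확히 반으로 나누기.py | count_equal_sum_partitions
-- ===== SOURCE A (Python) =====
-- def count_equal_sum_partitions(nums):
--     total_sum = sum(nums)
--
--     # 전체 합이 홀수인 경우 두 부분 배열로 나눠서 합이 동일하게 만들 수 없음
--     if total_sum % 2 != 0:
--         return 0
--
--     target_sum = total_sum // 2
--     count = [0] * (target_sum + 1) # [0이 18개]
--     count[0] = 1 # 첫번째에는 1를 대입
--
--     for num in nums:
--         for i in range(target_sum, num - 1, -1):
--             count[i] += count[i - num]
--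
--     return count[target_sum]
-- ===== SOURCE B (Python) =====
-- def count_equal_sum_partitions(nums):
--     total = sum(nums)
--     if total % 2 != 0:
--         return 0
--     target = total // 2
--     mid = len(nums) // 2
--     left = _subset_sum_counts(nums[:mid])
--     right = _subset_sum_counts(nums[mid:])
--     return sum(c * right.get(target - s, 0) for s, c in left.items())
--
--
-- def _subset_sum_counts(nums):
--     # sparse map: subset sum -> number of subsets of nums with that sum
--     counts = {0: 1}
--     for num in nums:
--         new = {}
--         for s, c in counts.items():
--             new[s] = new.get(s, 0) + c
--             new[s + num] = new.get(s + num, 0) + c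
--         counts = new
--     return counts
-- ===== Notes on version B (the rewrite author's own statement) =====
-- stated objective: alternative
-- what changed: Replaces the single backward in-place dense DP array over the whole list with a meet-in-the-middle scheme: split the list in two halves, build a sparse subset-sum->count map for each half independently, and combine them by convolution at the target (sum of left_count * right_count over matching sum pairs).
-- crash fix: On lists that contain a negative number and have an even total sum, A raises IndexError (count[i - num] indexes past the end of the DP array); B returns the subset count, e.g. 2 on [-1, 1]. — e.g. on count_equal_sum_partitions([-1, 1]): A raises IndexError, B returns 2
import Mathlib
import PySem

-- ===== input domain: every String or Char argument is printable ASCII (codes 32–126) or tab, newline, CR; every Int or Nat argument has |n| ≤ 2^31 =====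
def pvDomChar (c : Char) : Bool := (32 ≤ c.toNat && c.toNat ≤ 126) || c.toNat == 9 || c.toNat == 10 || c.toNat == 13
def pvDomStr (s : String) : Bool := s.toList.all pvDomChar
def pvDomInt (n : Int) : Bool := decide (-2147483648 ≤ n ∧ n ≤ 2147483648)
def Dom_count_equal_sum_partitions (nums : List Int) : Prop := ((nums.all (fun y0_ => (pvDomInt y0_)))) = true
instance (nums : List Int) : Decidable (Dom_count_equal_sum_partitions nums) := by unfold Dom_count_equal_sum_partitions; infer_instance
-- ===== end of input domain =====

-- B replaces A's backward in-place dense DP array with meet-in-the-middle: sparse subset-sum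
-- count maps for each half, combined by convolution at the target (alternative decomposition);
-- return values agree on Pre_.


-- ===== PORT A =====
-- Literal port of A. Indexing uses the total forms pyGetD/pySetD: on Pre_ every index is
-- nonnegative and in range, so they agree with Python; outside Pre_ Python raises IndexError.
def count_equal_sum_partitions (nums : List Int) : Int :=
  let total_sum : Int := nums.sum
  if PySem.Int.mod total_sum 2 ≠ 0 then 0
  else
    let target_sum : Int := PySem.Int.floordiv total_sum 2
    let count : List Int := PySem.List.pyRepeat [(0 : Int)] (target_sum + 1)
    let count := PySem.List.pySetD count 0 1
    let count := nums.foldl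
      (fun count num =>
        (PySem.List.pyRange target_sum (num - 1) (-1)).foldl
          (fun count i =>
            PySem.List.pySetD count i
              (PySem.List.pyGetD count i 0 + PySem.List.pyGetD count (i - num) 0))
          count)
      count
    PySem.List.pyGetD count target_sum 0

-- ===== PORT B =====
-- Loop body of B's inner 'for s, c in counts.items()': new[s] += c; new[s + num] += c.
def pvStep (num : Int) (nw : PySem.Dict Int Int) (sc : Int × Int) : PySem.Dict Int Int :=
  let nw1 := PySem.Dict.insert nw sc.1 (PySem.Dict.getD nw sc.1 0 + sc.2)
  PySem.Dict.insert nw1 (sc.1 + num) (PySem.Dict.getD nw1 (sc.1 + num) 0 + sc.2)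

-- B's helper _subset_sum_counts: sparse map subset sum -> number of subsets with that sum.
def pvSubsetSumCounts (nums : List Int) : PySem.Dict Int Int :=
  nums.foldl
    (fun counts num => counts.items.foldl (pvStep num) PySem.Dict.empty)
    (PySem.Dict.insert PySem.Dict.empty 0 1)

-- nums[:mid] / nums[mid:] with mid = len(nums)//2 ≥ 0 are exactly take/drop.
def count_equal_sum_partitions_alt (nums : List Int) : Int :=
  let total : Int := nums.sum
  if PySem.Int.mod total 2 ≠ 0 then 0
  else
    let target : Int := PySem.Int.floordiv total 2
    let mid : Nat := nums.length / 2
    let left := pvSubsetSumCounts (nums.take mid)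
    let right := pvSubsetSumCounts (nums.drop mid)
    left.items.foldl
      (fun acc sc => acc + sc.2 * PySem.Dict.getD right (target - sc.1) 0) 0

-- ===== PRECONDITION & SPEC =====
-- Pre_ excludes exactly the inputs where A raises: a list containing a negative number whose
-- total sum is even (A then indexes past the end of the DP array, IndexError).
def Pre_count_equal_sum_partitions (nums : List Int) : Prop :=
  PySem.Int.mod nums.sum 2 ≠ 0 ∨ ∀ x ∈ nums, 0 ≤ x
instance (nums : List Int) : Decidable (Pre_count_equal_sum_partitions nums) := by
  unfold Pre_count_equal_sum_partitions; infer_instance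
def pvWitness_count_equal_sum_partitions : List Int := [1, 2, 1]

-- On lists with a negative element and an even total A raises IndexError
-- (count[i - num] is past the array end); B returns the subset count (2 on [-1, 1]).
def Raises_count_equal_sum_partitions (nums : List Int) : Prop :=
  PySem.Int.mod nums.sum 2 = 0 ∧ ∃ x ∈ nums, x < 0
instance (nums : List Int) : Decidable (Raises_count_equal_sum_partitions nums) := by
  unfold Raises_count_equal_sum_partitions; infer_instance
def pvRaiseWitness_count_equal_sum_partitions : List Int := [-1, 1]
def pvRaiseWitnessOut_count_equal_sum_partitions : Int := 2

def Spec_count_equal_sum_partitions (nums : List Int) (out : Int) : Prop :=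
  out = count_equal_sum_partitions_alt nums
instance (nums : List Int) (out : Int) : Decidable (Spec_count_equal_sum_partitions nums out) := by
  unfold Spec_count_equal_sum_partitions; infer_instance

-- ===== CLAIM =====
def Claim_equal_count_equal_sum_partitions : Prop :=
  ∀ (nums : List Int), Dom_count_equal_sum_partitions nums →
    Pre_count_equal_sum_partitions nums →
    Spec_count_equal_sum_partitions nums (count_equal_sum_partitions nums)
def Claim_raises_count_equal_sum_partitions : Prop :=
  (∀ (nums : List Int), Dom_count_equal_sum_partitions nums →
      Raises_count_equal_sum_partitions nums → ¬ Pre_count_equal_sum_partitions nums) ∧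
  (Dom_count_equal_sum_partitions pvRaiseWitness_count_equal_sum_partitions ∧
    Raises_count_equal_sum_partitions pvRaiseWitness_count_equal_sum_partitions ∧
    count_equal_sum_partitions_alt pvRaiseWitness_count_equal_sum_partitions =
      pvRaiseWitnessOut_count_equal_sum_partitions)

-- ===== LEMMAS AND PROOFS =====

theorem pvGetD_set (xs : List Int) (n m : Nat) (v : Int) (hn : n < xs.length) :
    (xs.set n v).getD m 0 = if m = n then v else xs.getD m 0 := by
  rw [List.getD_eq_getElem?_getD, List.getD_eq_getElem?_getD, List.getElem?_set]
  by_cases h : n = m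
  · subst h; simp [hn]
  · simp [h, Ne.symm h]

-- Number of sublists of `p` whose sum is `t` (the mathematical spec both ports compute).
def pvCount : List Int → Int → Int
  | [], t => if t = 0 then 1 else 0
  | n :: ns, t => pvCount ns t + pvCount ns (t - n)

theorem pvCount_append (p : List Int) (n t : Int) :
    pvCount (p ++ [n]) t = pvCount p t + pvCount p (t - n) := by
  induction p generalizing t with
  | nil => simp [pvCount]
  | cons m ms ih => simp [pvCount, ih, sub_right_comm]; ring

theorem pvCount_nonneg (p : List Int) (t : Int) : 0 ≤ pvCount p t := by
  induction p generalizing t with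
  | nil => simp [pvCount]; split <;> norm_num
  | cons m ms ih => exact add_nonneg (ih t) (ih (t - m))

theorem pvCount_neg (p : List Int) (hp : ∀ x ∈ p, 0 ≤ x) (t : Int) (ht : t < 0) :
    pvCount p t = 0 := by
  induction p generalizing t with
  | nil => simp [pvCount]; omega
  | cons m ms ih =>
    have hm : 0 ≤ m := hp m (by simp)
    simp only [pvCount]
    rw [ih (fun x hx => hp x (by simp [hx])) t ht,
        ih (fun x hx => hp x (by simp [hx])) (t - m) (by omega)]
    simp

-- A's inner backward loop, pointwise.
theorem pvInner (num : Int) (hnum : 0 ≤ num) :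
    ∀ (fuel : Nat) (hi : Int), (hi - (num - 1)).toNat = fuel →
    ∀ (c : List Int), hi < (c.length : Int) →
    (((PySem.List.pyRange hi (num - 1) (-1)).foldl
        (fun count i =>
          PySem.List.pySetD count i
            (PySem.List.pyGetD count i 0 + PySem.List.pyGetD count (i - num) 0)) c).length
        = c.length) ∧
    (∀ t : Int, 0 ≤ t → t < (c.length : Int) →
      PySem.List.pyGetD ((PySem.List.pyRange hi (num - 1) (-1)).foldl
        (fun count i =>
          PySem.List.pySetD count i
            (PySem.List.pyGetD count i 0 + PySem.List.pyGetD count (i - num) 0)) c) t 0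
      = PySem.List.pyGetD c t 0 +
        (if num ≤ t ∧ t ≤ hi then PySem.List.pyGetD c (t - num) 0 else 0)) := by
  intro fuel
  induction fuel with
  | zero =>
    intro hi hfu c hhi
    rw [PySem.List.pyRange_neg_one_eq_nil (show hi ≤ num - 1 by omega)]
    refine ⟨rfl, fun t ht0 htl => ?_⟩
    rw [if_neg (by omega)]; simp
  | succ k ih =>
    intro hi hfu c hhi
    have hlt : num - 1 < hi := by omega
    have h0hi : 0 ≤ hi := by omega
    rw [PySem.List.pyRange_neg_one_cons hlt]
    simp only [List.foldl_cons]
    have hlen' : (PySem.List.pySetD c hi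
        (PySem.List.pyGetD c hi 0 + PySem.List.pyGetD c (hi - num) 0)).length = c.length :=
      PySem.List.length_pySetD c hi _
    obtain ⟨hlenr, hr⟩ := ih (hi - 1) (by omega)
      (PySem.List.pySetD c hi (PySem.List.pyGetD c hi 0 + PySem.List.pyGetD c (hi - num) 0))
      (by rw [hlen']; omega)
    have hgc' : ∀ u : Int, 0 ≤ u → u < (c.length : Int) →
        PySem.List.pyGetD (PySem.List.pySetD c hi
          (PySem.List.pyGetD c hi 0 + PySem.List.pyGetD c (hi - num) 0)) u 0
        = if u = hi then PySem.List.pyGetD c hi 0 + PySem.List.pyGetD c (hi - num) 0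
          else PySem.List.pyGetD c u 0 := by
      intro u hu0 hul
      rw [PySem.List.pySetD_of_nonneg _ _ h0hi, PySem.List.pyGetD_of_nonneg _ _ hu0,
          pvGetD_set _ _ _ _ (show hi.toNat < c.length by omega)]
      by_cases he : u = hi
      · rw [if_pos (by omega), if_pos he]
      · rw [if_neg (by omega), if_neg he, ← PySem.List.pyGetD_of_nonneg _ _ hu0]
    refine ⟨by rw [hlenr, hlen'], fun t ht0 htl => ?_⟩
    rw [hr t ht0 (by rw [hlen']; exact htl), hgc' t ht0 htl]
    by_cases hthi : t = hi
    · rw [if_pos hthi, if_neg (by omega), if_pos (by omega), hthi]; ring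
    · rw [if_neg hthi]
      by_cases hcond : num ≤ t ∧ t ≤ hi - 1
      · rw [if_pos hcond, hgc' (t - num) (by omega) (by omega), if_neg (by omega)]
        rw [if_pos (show num ≤ t ∧ t ≤ hi by omega)]
      · rw [if_neg hcond, if_neg (by omega)]

-- A's outer fold.
theorem pvOuter (hi : Int) :
    ∀ (p q : List Int), (∀ x ∈ p, 0 ≤ x) → (∀ x ∈ q, 0 ≤ x) →
    ∀ (c : List Int), (c.length : Int) = hi + 1 →
    (∀ t : Int, 0 ≤ t → t < (c.length : Int) → PySem.List.pyGetD c t 0 = pvCount q t) →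
    ((p.foldl
        (fun count num =>
          (PySem.List.pyRange hi (num - 1) (-1)).foldl
            (fun count i =>
              PySem.List.pySetD count i
                (PySem.List.pyGetD count i 0 + PySem.List.pyGetD count (i - num) 0)) count)
        c).length : Int) = hi + 1 ∧
    (∀ t : Int, 0 ≤ t → t < hi + 1 →
      PySem.List.pyGetD (p.foldl
        (fun count num =>
          (PySem.List.pyRange hi (num - 1) (-1)).foldl
            (fun count i =>
              PySem.List.pySetD count i
                (PySem.List.pyGetD count i 0 + PySem.List.pyGetD count (i - num) 0)) count)
        c) t 0 = pvCount (q ++ p) t) := by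
  intro p
  induction p with
  | nil =>
    intro q _ _ c hlen hv
    exact ⟨by simpa using hlen, fun t ht0 htl => by
      simpa using hv t ht0 (by omega)⟩
  | cons num p' ih =>
    intro q hp hq c hlen hv
    have hnum : 0 ≤ num := hp num (by simp)
    simp only [List.foldl_cons]
    obtain ⟨hl1, hv1⟩ := pvInner num hnum (hi - (num - 1)).toNat hi rfl c (by omega)
    have hv1' : ∀ t : Int, 0 ≤ t →
        t < (((PySem.List.pyRange hi (num - 1) (-1)).foldl
          (fun count i =>
            PySem.List.pySetD count i
              (PySem.List.pyGetD count i 0 + PySem.List.pyGetD count (i - num) 0)) c).length : Int) →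
        PySem.List.pyGetD ((PySem.List.pyRange hi (num - 1) (-1)).foldl
          (fun count i =>
            PySem.List.pySetD count i
              (PySem.List.pyGetD count i 0 + PySem.List.pyGetD count (i - num) 0)) c) t 0
        = pvCount (q ++ [num]) t := by
      intro t ht0 htl
      rw [hl1] at htl
      rw [hv1 t ht0 htl, pvCount_append]
      by_cases hc : num ≤ t
      · rw [if_pos ⟨hc, by omega⟩, hv t ht0 htl, hv (t - num) (by omega) (by omega)]
      · rw [if_neg (by omega), hv t ht0 htl, pvCount_neg q hq (t - num) (by omega), add_zero]
    have hres := ih (q ++ [num]) (fun x hx => hp x (by simp [hx]))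
      (by intro x hx; rcases List.mem_append.mp hx with h | h
          · exact hq x h
          · simp at h; omega)
      _ (by rw [hl1]; exact hlen) hv1'
    refine ⟨hres.1, fun t ht0 htl => ?_⟩
    rw [hres.2 t ht0 htl]
    simp

theorem pvA_eq (nums : List Int) (he : ¬ PySem.Int.mod nums.sum 2 ≠ 0)
    (hnn : ∀ x ∈ nums, 0 ≤ x) :
    count_equal_sum_partitions nums
      = pvCount nums (PySem.Int.floordiv nums.sum 2) := by
  have hsum : 0 ≤ nums.sum := List.sum_nonneg hnn
  have htgt : 0 ≤ PySem.Int.floordiv nums.sum 2 := by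
    rw [PySem.Int.floordiv_eq_ediv_of_pos (by omega)]
    exact Int.ediv_nonneg hsum (by omega)
  simp only [count_equal_sum_partitions]
  rw [if_neg he]
  have hc0 : PySem.List.pySetD (PySem.List.pyRepeat [(0 : Int)] (PySem.Int.floordiv nums.sum 2 + 1)) 0 1
      = (List.replicate (PySem.Int.floordiv nums.sum 2 + 1).toNat (0 : Int)).set 0 1 := by
    rw [PySem.List.pyRepeat_singleton, PySem.List.pySetD_of_nonneg _ _ (by omega)]
    rfl
  rw [hc0]
  have hlen0 : ((((List.replicate (PySem.Int.floordiv nums.sum 2 + 1).toNat (0 : Int)).set 0 1).length : Int))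
      = PySem.Int.floordiv nums.sum 2 + 1 := by
    simp; omega
  have hv0 : ∀ t : Int, 0 ≤ t →
      t < ((((List.replicate (PySem.Int.floordiv nums.sum 2 + 1).toNat (0 : Int)).set 0 1).length : Int)) →
      PySem.List.pyGetD ((List.replicate (PySem.Int.floordiv nums.sum 2 + 1).toNat (0 : Int)).set 0 1) t 0
      = pvCount [] t := by
    intro t ht0 htl
    rw [PySem.List.pyGetD_of_nonneg _ _ ht0,
        pvGetD_set _ _ _ _ (by simp; omega)]
    rw [hlen0] at htl
    by_cases ht : t = 0
    · rw [if_pos (by omega)]; simp [pvCount, ht]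
    · rw [if_neg (by omega)]
      rw [List.getD_eq_getElem?_getD, List.getElem?_replicate]
      simp only [pvCount, if_neg ht]
      rw [if_pos (by omega)]
      rfl
  obtain ⟨hl, hv⟩ := pvOuter (PySem.Int.floordiv nums.sum 2) nums [] hnn (by simp) _ hlen0 hv0
  simpa using hv (PySem.Int.floordiv nums.sum 2) htgt (by omega)

-- ===== B-side lemmas =====

-- value recorded for key t in an association list (sum over duplicate keys)
def pvVal (L : List (Int × Int)) (t : Int) : Int :=
  ((L.filter (fun p => p.1 == t)).map Prod.snd).sum

theorem pvVal_nil (t : Int) : pvVal [] t = 0 := rfl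

theorem pvVal_cons (sc : Int × Int) (L : List (Int × Int)) (t : Int) :
    pvVal (sc :: L) t = (if sc.1 = t then sc.2 else 0) + pvVal L t := by
  simp only [pvVal, List.filter_cons]
  by_cases h : sc.1 = t
  · simp [h]
  · simp [h]

theorem pvGetD_pvStep (num : Int) (nw : PySem.Dict Int Int) (sc : Int × Int) (t : Int) :
    PySem.Dict.getD (pvStep num nw sc) t 0
      = PySem.Dict.getD nw t 0 + (if t = sc.1 then sc.2 else 0)
          + (if t = sc.1 + num then sc.2 else 0) := by
  simp only [pvStep, PySem.Dict.getD_insert]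
  split_ifs <;> (try subst_vars) <;> simp_all

theorem pvGetD_foldStep (num : Int) :
    ∀ (L : List (Int × Int)) (acc : PySem.Dict Int Int) (t : Int),
      PySem.Dict.getD (L.foldl (pvStep num) acc) t 0
        = PySem.Dict.getD acc t 0 + pvVal L t + pvVal L (t - num) := by
  intro L
  induction L with
  | nil => intro acc t; simp [pvVal_nil]
  | cons sc L' ih =>
    intro acc t
    simp only [List.foldl_cons]
    rw [ih, pvGetD_pvStep, pvVal_cons, pvVal_cons]
    have e1 : (if t = sc.1 then sc.2 else 0) = (if sc.1 = t then sc.2 else 0) :=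
      if_congr eq_comm rfl rfl
    have e2 : (if t = sc.1 + num then sc.2 else 0) = (if sc.1 = t - num then sc.2 else 0) :=
      if_congr (by omega) rfl rfl
    rw [e1, e2]
    ring

theorem pvContains_pvStep (num : Int) (nw : PySem.Dict Int Int) (sc : Int × Int) (t : Int) :
    (PySem.Dict.contains (pvStep num nw sc) t = true
      ↔ t = sc.1 ∨ t = sc.1 + num ∨ PySem.Dict.contains nw t = true) := by
  simp only [pvStep, PySem.Dict.contains_insert]
  simp [or_left_comm]

theorem pvContains_foldStep (num : Int) :
    ∀ (L : List (Int × Int)) (acc : PySem.Dict Int Int) (t : Int),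
      (PySem.Dict.contains (L.foldl (pvStep num) acc) t = true
        ↔ PySem.Dict.contains acc t = true ∨ t ∈ L.map Prod.fst
            ∨ t - num ∈ L.map Prod.fst) := by
  intro L
  induction L with
  | nil =>
    intro acc t
    simp only [List.foldl_nil, List.map_nil, List.mem_nil_iff, or_false]
  | cons sc L' ih =>
    intro acc t
    simp only [List.foldl_cons, List.map_cons, List.mem_cons]
    rw [ih, pvContains_pvStep]
    constructor
    · rintro ((h | h | h) | h | h)
      · exact Or.inr (Or.inl (Or.inl h))
      · exact Or.inr (Or.inr (Or.inl (by omega)))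
      · exact Or.inl h
      · exact Or.inr (Or.inl (Or.inr h))
      · exact Or.inr (Or.inr (Or.inr h))
    · rintro (h | (h | h) | (h | h))
      · exact Or.inl (Or.inr (Or.inr h))
      · exact Or.inl (Or.inl h)
      · exact Or.inr (Or.inl h)
      · exact Or.inl (Or.inr (Or.inl (by omega)))
      · exact Or.inr (Or.inr h)

-- with distinct keys, pvVal over d.items is exactly d.getD
theorem pvVal_items_aux (t : Int) :
    ∀ (L : List (Int × Int)), (L.map Prod.fst).Nodup →
      pvVal L t = PySem.Dict.getD (PySem.Dict.mk L) t 0 := by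
  intro L
  induction L with
  | nil => intro _; rfl
  | cons kv L' ih =>
    intro hnd
    rw [List.map_cons, List.nodup_cons] at hnd
    rw [pvVal_cons, ih hnd.2]
    rw [PySem.Dict.getD_eq_get?_getD, PySem.Dict.getD_eq_get?_getD]
    have : (PySem.Dict.mk (kv :: L')) = (PySem.Dict.mk ((kv.1, kv.2) :: L')) := by simp
    rw [this, PySem.Dict.get?_mk_cons]
    by_cases h : kv.1 = t
    · have hnin : t ∉ L'.map Prod.fst := h ▸ hnd.1
      have : PySem.Dict.get? (PySem.Dict.mk L') t = none := by
        rw [PySem.Dict.get?_eq_none_iff_not_mem_keys]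
        simpa [PySem.Dict.keys] using hnin
      simp [h, this]
    · simp [h, show (kv.1 == t) = false from by simpa using h]

theorem pvVal_items (d : PySem.Dict Int Int) (hnd : d.keys.Nodup) (t : Int) :
    pvVal d.items t = PySem.Dict.getD d t 0 := by
  have := pvVal_items_aux t d.items (by simpa [PySem.Dict.keys] using hnd)
  simpa using this

theorem pvNodup_pvStep (num : Int) (nw : PySem.Dict Int Int) (sc : Int × Int)
    (h : nw.keys.Nodup) : (pvStep num nw sc).keys.Nodup := by
  unfold pvStep
  exact PySem.Dict.nodup_keys_insert _ _ _ (PySem.Dict.nodup_keys_insert _ _ _ h)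

theorem pvNodup_foldStep (num : Int) :
    ∀ (L : List (Int × Int)) (acc : PySem.Dict Int Int), acc.keys.Nodup →
      (L.foldl (pvStep num) acc).keys.Nodup := by
  intro L
  induction L with
  | nil => intro acc h; simpa using h
  | cons sc L' ih => intro acc h; exact ih _ (pvNodup_pvStep num acc sc h)

def pvGood (d : PySem.Dict Int Int) (l : List Int) : Prop :=
  d.keys.Nodup ∧ (∀ s : Int, PySem.Dict.getD d s 0 = pvCount l s) ∧
    (∀ s : Int, pvCount l s ≠ 0 → PySem.Dict.contains d s = true)

theorem pvGood_step (d : PySem.Dict Int Int) (l : List Int) (num : Int) (h : pvGood d l) :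
    pvGood (d.items.foldl (pvStep num) PySem.Dict.empty) (l ++ [num]) := by
  obtain ⟨hnd, hget, hsup⟩ := h
  refine ⟨pvNodup_foldStep num d.items PySem.Dict.empty (by simp), ?_, ?_⟩
  · intro s
    rw [pvGetD_foldStep num d.items PySem.Dict.empty s, PySem.Dict.getD_empty,
        pvVal_items d hnd, pvVal_items d hnd, hget, hget, pvCount_append]
    ring
  · intro s hs
    rw [pvCount_append] at hs
    have h1 := pvCount_nonneg l s
    have h2 := pvCount_nonneg l (s - num)
    rw [pvContains_foldStep]
    rcases (show pvCount l s ≠ 0 ∨ pvCount l (s - num) ≠ 0 by omega) with hc | hc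
    · have := hsup s hc
      rw [PySem.Dict.contains_eq_decide_mem_keys] at this
      exact Or.inr (Or.inl (by simpa [PySem.Dict.keys] using of_decide_eq_true this))
    · have := hsup (s - num) hc
      rw [PySem.Dict.contains_eq_decide_mem_keys] at this
      exact Or.inr (Or.inr (by simpa [PySem.Dict.keys] using of_decide_eq_true this))

theorem pvGood_foldl :
    ∀ (xs l : List Int) (d : PySem.Dict Int Int), pvGood d l →
      pvGood (xs.foldl (fun counts num => counts.items.foldl (pvStep num) PySem.Dict.empty) d)
        (l ++ xs) := by
  intro xs
  induction xs with
  | nil => intro l d h; simpa using h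
  | cons num xs' ih =>
    intro l d h
    simp only [List.foldl_cons]
    have := ih (l ++ [num]) _ (pvGood_step d l num h)
    simpa using this

theorem pvGood_subsetSumCounts (xs : List Int) : pvGood (pvSubsetSumCounts xs) xs := by
  have hinit : pvGood (PySem.Dict.insert PySem.Dict.empty 0 1) [] := by
    refine ⟨PySem.Dict.nodup_keys_insert _ _ _ (by simp), ?_, ?_⟩
    · intro s
      rw [PySem.Dict.getD_insert, PySem.Dict.getD_empty]
      simp [pvCount]
    · intro s hs
      have hz : s = 0 := by by_contra hne; simp [pvCount, hne] at hs
      rw [hz, PySem.Dict.contains_insert]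
      simp
  simpa using pvGood_foldl xs [] _ hinit

theorem pvConv :
    ∀ (xs ys : List Int) (t : Int) (S : Finset Int),
      (∀ s : Int, pvCount xs s ≠ 0 → s ∈ S) →
      pvCount (xs ++ ys) t = ∑ s ∈ S, pvCount xs s * pvCount ys (t - s) := by
  intro xs
  induction xs with
  | nil =>
    intro ys t S hS
    have h0 : (0 : Int) ∈ S := hS 0 (by simp [pvCount])
    rw [List.nil_append,
        Finset.sum_eq_single_of_mem 0 h0 (fun b _ hb => by simp [pvCount, hb])]
    simp [pvCount]
  | cons m ms ih =>
    intro ys t S hS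
    have hsub1 : ∀ s : Int, pvCount ms s ≠ 0 → s ∈ S := by
      intro s hs
      have h1 := pvCount_nonneg ms s
      have h2 := pvCount_nonneg ms (s - m)
      exact hS s (by simp only [pvCount]; omega)
    have hsub2 : ∀ s : Int, pvCount ms s ≠ 0 → s ∈ S.image (· - m) := by
      intro s hs
      have h1 := pvCount_nonneg ms (s + m)
      have h2 := pvCount_nonneg ms s
      have hmem : s + m ∈ S := by
        apply hS (s + m)
        have he : s + m - m = s := by ring
        simp only [pvCount, he]
        omega
      exact Finset.mem_image.mpr ⟨s + m, hmem, by ring⟩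
    have e1 := ih ys t S hsub1
    have e2 := ih ys (t - m) (S.image (· - m)) hsub2
    rw [Finset.sum_image (by intro a _ b _ hab; dsimp at hab; omega)] at e2
    show pvCount (ms ++ ys) t + pvCount (ms ++ ys) (t - m) = _
    rw [e1, e2, ← Finset.sum_add_distrib]
    apply Finset.sum_congr rfl
    intro s _
    have he : t - m - (s - m) = t - s := by ring
    rw [he]
    simp only [pvCount]
    ring

theorem pvB_eq (nums : List Int) :
    count_equal_sum_partitions_alt nums
      = if PySem.Int.mod nums.sum 2 ≠ 0 then 0
        else pvCount nums (PySem.Int.floordiv nums.sum 2) := by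
  simp only [count_equal_sum_partitions_alt]
  by_cases h : PySem.Int.mod nums.sum 2 ≠ 0
  · rw [if_pos h, if_pos h]
  · rw [if_neg h, if_neg h]
    set target := PySem.Int.floordiv nums.sum 2 with htgt
    set mid := nums.length / 2 with hmid
    obtain ⟨hndL, hgetL, hsupL⟩ := pvGood_subsetSumCounts (nums.take mid)
    obtain ⟨hndR, hgetR, hsupR⟩ := pvGood_subsetSumCounts (nums.drop mid)
    rw [PySem.List.foldl_add (pvSubsetSumCounts (nums.take mid)).items
          (fun sc : Int × Int =>
            sc.2 * PySem.Dict.getD (pvSubsetSumCounts (nums.drop mid)) (target - sc.1) 0) 0,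
        zero_add,
        PySem.Dict.items_eq_map_keys _ hndL 0, List.map_map]
    have hmap : ((pvSubsetSumCounts (nums.take mid)).keys.map
        ((fun sc : Int × Int =>
            sc.2 * PySem.Dict.getD (pvSubsetSumCounts (nums.drop mid)) (target - sc.1) 0)
          ∘ fun k => (k, PySem.Dict.getD (pvSubsetSumCounts (nums.take mid)) k 0)))
        = (pvSubsetSumCounts (nums.take mid)).keys.map
            (fun k => pvCount (nums.take mid) k * pvCount (nums.drop mid) (target - k)) := by
      apply List.map_congr_left
      intro k _
      simp only [Function.comp]
      rw [hgetL, hgetR]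
    rw [hmap, ← List.sum_toFinset _ hndL]
    have hsupp : ∀ s : Int, pvCount (nums.take mid) s ≠ 0 →
        s ∈ (pvSubsetSumCounts (nums.take mid)).keys.toFinset := by
      intro s hs
      have := hsupL s hs
      rw [PySem.Dict.contains_eq_decide_mem_keys] at this
      exact List.mem_toFinset.mpr (of_decide_eq_true this)
    rw [← pvConv (nums.take mid) (nums.drop mid) target _ hsupp, List.take_append_drop]

-- ===== VERDICT =====
theorem count_equal_sum_partitions_spec : Claim_equal_count_equal_sum_partitions := by
  intro nums _ hpre
  unfold Spec_count_equal_sum_partitions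
  rw [pvB_eq]
  by_cases h : PySem.Int.mod nums.sum 2 ≠ 0
  · rw [if_pos h]
    simp only [count_equal_sum_partitions]
    rw [if_pos h]
  · rw [if_neg h]
    exact pvA_eq nums h (hpre.resolve_left (by simpa using h))

theorem count_equal_sum_partitions_raises : Claim_raises_count_equal_sum_partitions := by
  unfold Claim_raises_count_equal_sum_partitions
  constructor
  · intro nums _ hr hpre
    rcases hr with ⟨heven, x, hx, hneg⟩
    rcases hpre with h | h
    · exact h heven
    · exact absurd (h x hx) (by omega)
  · refine ⟨by decide, by decide, by decide⟩

-- Self-check: re-read the raise witness's value off the raises theorem (keeps the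
-- checked fact 'B returns 2 on [-1, 1]' visible at the bottom of the file).
theorem count_equal_sum_partitions_raises_ok :
    count_equal_sum_partitions_alt pvRaiseWitness_count_equal_sum_partitions
      = pvRaiseWitnessOut_count_equal_sum_partitions :=
  count_equal_sum_partitions_raises.2.2.2
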